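-- pv_equiv track=rewrite | github.com/trackrat-dev/TrackRat | backend_v2/src/trackrat/collectors/path/discovery.py | _headsign_matches_station
-- ===== SOURCE A (Python) =====
-- HEADSIGN_TO_STATION_MAP: dict[str, str] = {
--     "world trade": "PWC",
--     "wtc": "PWC",
--     "hoboken": "PHO",
--     "newark": "PNK",
--     "journal square": "PJS",
--     "jsq": "PJS",
--     "33rd": "P33",
--     "33 st": "P33",
--     "grove": "PGR",
--     "harrison": "PHR",
--     "exchange": "PEX",
--     "newport": "PNP",
--     "christopher": "PCH",
--     "9th": "P9S",
--     "14th": "P14",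
--     "23rd": "P23",
-- }
--
-- def _headsign_matches_station(headsign: str, station_code: str) -> bool:
--     """Check if a headsign indicates the train's destination is this station.
--
--     Used to detect trains that have ARRIVED at their destination (skip these).
--
--     Args:
--         headsign: Train headsign (e.g., "33rd Street", "World Trade Center")
--         station_code: Internal station code (e.g., "P33", "PWC")
--
--     Returns:
--         True if the headsign indicates the train is going TO this station
--     """
--     if not headsign:
--         return False
--
--     headsign_lower = headsign.lower().strip()
--
--     for keyword, mapped_station in HEADSIGN_TO_STATION_MAP.items():
--         if keyword in headsign_lower and mapped_station == station_code:
--             return True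
--
--     return False
-- ===== SOURCE B (Python) =====
-- HEADSIGN_TO_STATION_MAP: dict[str, str] = {
--     "world trade": "PWC",
--     "wtc": "PWC",
--     "hoboken": "PHO",
--     "newark": "PNK",
--     "journal square": "PJS",
--     "jsq": "PJS",
--     "33rd": "P33",
--     "33 st": "P33",
--     "grove": "PGR",
--     "harrison": "PHR",
--     "exchange": "PEX",
--     "newport": "PNP",
--     "christopher": "PCH",
--     "9th": "P9S",
--     "14th": "P14",
--     "23rd": "P23",
-- }
--
-- # Reverse index built once at module load: station code -> keywords resolving to it.
-- STATION_TO_KEYWORDS: dict[str, tuple[str, ...]] = {}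
-- for _kw, _st in HEADSIGN_TO_STATION_MAP.items():
--     STATION_TO_KEYWORDS[_st] = STATION_TO_KEYWORDS.get(_st, ()) + (_kw,)
--
--
-- def _headsign_matches_station(headsign: str, station_code: str) -> bool:
--     if not headsign:
--         return False
--     headsign_lower = headsign.lower().strip()
--     return any(kw in headsign_lower
--                for kw in STATION_TO_KEYWORDS.get(station_code, ()))
-- ===== Notes on version B (the rewrite author's own statement) =====
-- stated objective: idiomatic
-- what changed: Replaces the full scan over the forward keyword-to-station map by a one-time reverse index station->keywords, so the function does a single dict lookup and tests only that station's keywords.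
import Mathlib
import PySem

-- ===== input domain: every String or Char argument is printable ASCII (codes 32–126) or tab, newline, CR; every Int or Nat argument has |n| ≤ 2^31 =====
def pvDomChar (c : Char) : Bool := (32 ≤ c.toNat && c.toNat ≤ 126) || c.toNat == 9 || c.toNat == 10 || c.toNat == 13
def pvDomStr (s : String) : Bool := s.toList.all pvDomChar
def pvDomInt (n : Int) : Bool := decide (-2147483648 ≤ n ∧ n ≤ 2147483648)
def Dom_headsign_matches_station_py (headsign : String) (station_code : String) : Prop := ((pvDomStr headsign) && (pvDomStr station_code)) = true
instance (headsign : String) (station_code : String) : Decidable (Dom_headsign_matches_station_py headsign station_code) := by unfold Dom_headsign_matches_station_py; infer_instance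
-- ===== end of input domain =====

-- B replaces A's full scan of the forward map by a one-time reverse index
-- station -> keywords plus a single lookup (objective: idiomatic).

-- ===== PORT A =====
def HEADSIGN_TO_STATION_MAP : List (String × String) :=
  [("world trade", "PWC"), ("wtc", "PWC"), ("hoboken", "PHO"), ("newark", "PNK"),
   ("journal square", "PJS"), ("jsq", "PJS"), ("33rd", "P33"), ("33 st", "P33"),
   ("grove", "PGR"), ("harrison", "PHR"), ("exchange", "PEX"), ("newport", "PNP"),
   ("christopher", "PCH"), ("9th", "P9S"), ("14th", "P14"), ("23rd", "P23")]

-- the 'for keyword, mapped_station in …: if … : return True' loop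
def headsignScanLoop (hl : List Char) (station_code : String) : List (String × String) → Bool
  | [] => false
  | (k, v) :: rest =>
      if PySem.Chars.isIn k.toList hl && v == station_code then true
      else headsignScanLoop hl station_code rest

def headsign_matches_station_py (headsign : String) (station_code : String) : Bool :=
  if headsign == "" then false
  else
    let headsign_lower := PySem.Chars.strip (PySem.Chars.lower headsign.toList)
    headsignScanLoop headsign_lower station_code HEADSIGN_TO_STATION_MAP

-- ===== PORT B =====
-- reverse index built once from the forward map (Source B's module-level loop)
def STATION_TO_KEYWORDS : PySem.Dict String (List String) :=
  HEADSIGN_TO_STATION_MAP.foldl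
    (fun d p => PySem.Dict.insert d p.2 (PySem.Dict.getD d p.2 [] ++ [p.1]))
    PySem.Dict.empty

def headsign_matches_station_py_alt (headsign : String) (station_code : String) : Bool :=
  if headsign == "" then false
  else
    let headsign_lower := PySem.Chars.strip (PySem.Chars.lower headsign.toList)
    (PySem.Dict.getD STATION_TO_KEYWORDS station_code []).any
      (fun kw => PySem.Chars.isIn kw.toList headsign_lower)

-- ===== PRECONDITION & SPEC =====
def Spec_headsign_matches_station_py (headsign : String) (station_code : String) (out : Bool) : Prop := out = headsign_matches_station_py_alt headsign station_code
instance (headsign : String) (station_code : String) (out : Bool) : Decidable (Spec_headsign_matches_station_py headsign station_code out) := by unfold Spec_headsign_matches_station_py; infer_instance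

-- ===== CLAIM (what is proved, stated in full; the proofs are below) =====
def Claim_equal_headsign_matches_station_py : Prop := ∀ (headsign : String) (station_code : String), Dom_headsign_matches_station_py headsign station_code → Spec_headsign_matches_station_py headsign station_code (headsign_matches_station_py headsign station_code)

-- ===== LEMMAS AND PROOFS =====

-- the core fact: for any lowered/stripped text, the scan of the forward map
-- equals the lookup-then-narrow-scan over the reverse index
theorem scan_eq_lookup (hl : List Char) (sc : String) :
    headsignScanLoop hl sc HEADSIGN_TO_STATION_MAP
      = (PySem.Dict.getD STATION_TO_KEYWORDS sc []).any
          (fun kw => PySem.Chars.isIn kw.toList hl) := by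
  by_cases h1 : sc = "PWC"
  · subst h1
    rw [show PySem.Dict.getD STATION_TO_KEYWORDS "PWC" [] = ["world trade", "wtc"] from by decide]
    simp [headsignScanLoop, HEADSIGN_TO_STATION_MAP]
  by_cases h2 : sc = "PHO"
  · subst h2
    rw [show PySem.Dict.getD STATION_TO_KEYWORDS "PHO" [] = ["hoboken"] from by decide]
    simp [headsignScanLoop, HEADSIGN_TO_STATION_MAP]
  by_cases h3 : sc = "PNK"
  · subst h3
    rw [show PySem.Dict.getD STATION_TO_KEYWORDS "PNK" [] = ["newark"] from by decide]
    simp [headsignScanLoop, HEADSIGN_TO_STATION_MAP]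
  by_cases h4 : sc = "PJS"
  · subst h4
    rw [show PySem.Dict.getD STATION_TO_KEYWORDS "PJS" [] = ["journal square", "jsq"] from by decide]
    simp [headsignScanLoop, HEADSIGN_TO_STATION_MAP]
  by_cases h5 : sc = "P33"
  · subst h5
    rw [show PySem.Dict.getD STATION_TO_KEYWORDS "P33" [] = ["33rd", "33 st"] from by decide]
    simp [headsignScanLoop, HEADSIGN_TO_STATION_MAP]
  by_cases h6 : sc = "PGR"
  · subst h6
    rw [show PySem.Dict.getD STATION_TO_KEYWORDS "PGR" [] = ["grove"] from by decide]
    simp [headsignScanLoop, HEADSIGN_TO_STATION_MAP]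
  by_cases h7 : sc = "PHR"
  · subst h7
    rw [show PySem.Dict.getD STATION_TO_KEYWORDS "PHR" [] = ["harrison"] from by decide]
    simp [headsignScanLoop, HEADSIGN_TO_STATION_MAP]
  by_cases h8 : sc = "PEX"
  · subst h8
    rw [show PySem.Dict.getD STATION_TO_KEYWORDS "PEX" [] = ["exchange"] from by decide]
    simp [headsignScanLoop, HEADSIGN_TO_STATION_MAP]
  by_cases h9 : sc = "PNP"
  · subst h9
    rw [show PySem.Dict.getD STATION_TO_KEYWORDS "PNP" [] = ["newport"] from by decide]
    simp [headsignScanLoop, HEADSIGN_TO_STATION_MAP]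
  by_cases h10 : sc = "PCH"
  · subst h10
    rw [show PySem.Dict.getD STATION_TO_KEYWORDS "PCH" [] = ["christopher"] from by decide]
    simp [headsignScanLoop, HEADSIGN_TO_STATION_MAP]
  by_cases h11 : sc = "P9S"
  · subst h11
    rw [show PySem.Dict.getD STATION_TO_KEYWORDS "P9S" [] = ["9th"] from by decide]
    simp [headsignScanLoop, HEADSIGN_TO_STATION_MAP]
  by_cases h12 : sc = "P14"
  · subst h12
    rw [show PySem.Dict.getD STATION_TO_KEYWORDS "P14" [] = ["14th"] from by decide]
    simp [headsignScanLoop, HEADSIGN_TO_STATION_MAP]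
  by_cases h13 : sc = "P23"
  · subst h13
    rw [show PySem.Dict.getD STATION_TO_KEYWORDS "P23" [] = ["23rd"] from by decide]
    simp [headsignScanLoop, HEADSIGN_TO_STATION_MAP]
  · have hc : STATION_TO_KEYWORDS.contains sc = false := by
      rw [PySem.Dict.contains_eq_decide_mem_keys,
        show STATION_TO_KEYWORDS.keys
            = ["PWC","PHO","PNK","PJS","P33","PGR","PHR","PEX","PNP","PCH","P9S","P14","P23"]
          from by decide]
      simp [h1, h2, h3, h4, h5, h6, h7, h8, h9, h10, h11, h12, h13]
    rw [PySem.Dict.getD_of_not_contains _ _ hc]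
    simp [headsignScanLoop, HEADSIGN_TO_STATION_MAP, Ne.symm h1, Ne.symm h2, Ne.symm h3, Ne.symm h4, Ne.symm h5, Ne.symm h6, Ne.symm h7, Ne.symm h8, Ne.symm h9, Ne.symm h10, Ne.symm h11, Ne.symm h12, Ne.symm h13]

-- ===== VERDICT (by name: the statement is the Claim_ definition above) =====
theorem headsign_matches_station_py_spec : Claim_equal_headsign_matches_station_py := by
  intro headsign station_code _
  unfold Spec_headsign_matches_station_py
  unfold headsign_matches_station_py headsign_matches_station_py_alt
  by_cases h : headsign == ""
  · simp [h]
  · simp only [h, if_neg, Bool.false_eq_true, not_false_eq_true]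
    exact scan_eq_lookup _ _
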